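-- pv_equiv track=rewrite | github.com/yeardream-high6/coding_test | 이부경/LeetCode/2300/2293. Min Max Game.py | minMaxGame
-- ===== SOURCE A (Python) =====
-- from typing import List
--
-- def minMaxGame(nums: List[int]) -> int:
--     while(len(nums) > 1):
--         newNums = []
--         for i in range(len(nums) // 2):
--             if i % 2:
--                 value = max(nums[2 * i], nums[2 * i + 1])
--             else:
--                 value = min(nums[2 * i], nums[2 * i + 1])
--             newNums.append(value)
--         nums = newNums
--
--     return nums[0]
-- ===== SOURCE B (Python) =====
-- def minMaxGame(nums):
--     if len(nums) <= 1:
--         return nums[0]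
--     it = iter(nums)
--     reduced = [min(a, b) if i % 2 == 0 else max(a, b)
--                for i, (a, b) in enumerate(zip(it, it))]
--     return minMaxGame(reduced)
-- ===== Notes on version B (the rewrite author's own statement) =====
-- stated objective: alternative
-- what changed: Replaces the outer while loop by recursion and the index-based inner for loop (range(len//2) with nums[2*i], nums[2*i+1]) by pairing the list with zip(it, it) and mapping an enumerate-indexed min/max comprehension over the pairs.
import Mathlib
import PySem

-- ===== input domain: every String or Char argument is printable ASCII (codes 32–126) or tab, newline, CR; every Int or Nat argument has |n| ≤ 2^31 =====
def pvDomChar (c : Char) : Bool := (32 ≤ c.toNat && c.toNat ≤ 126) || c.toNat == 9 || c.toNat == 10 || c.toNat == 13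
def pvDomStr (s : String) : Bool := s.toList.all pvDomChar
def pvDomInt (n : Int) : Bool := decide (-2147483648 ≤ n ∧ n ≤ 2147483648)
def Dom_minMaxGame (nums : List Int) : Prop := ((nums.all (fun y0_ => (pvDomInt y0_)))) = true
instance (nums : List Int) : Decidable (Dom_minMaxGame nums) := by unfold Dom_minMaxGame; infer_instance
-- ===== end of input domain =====

-- B replaces A's while loop by recursion and its index-based inner loop by a min/max
-- comprehension over enumerate(zip(it, it)); alternative, same cost.
-- Pre_ excludes the empty list, on which both Pythons raise IndexError (nums[0]).


-- ===== PORT A =====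
-- one iteration of A's while-body: for i in range(len(nums)//2): append min/max of nums[2i],nums[2i+1]
-- (the indices 2*i, 2*i+1 are always in range, so List.getD is exact for Python's nums[...])
def pvStepA (nums : List Int) : List Int :=
  (List.range (nums.length / 2)).foldl
    (fun newNums i =>
      newNums ++ [if i % 2 = 1 then
          max (nums.getD (2 * i) 0) (nums.getD (2 * i + 1) 0)
        else
          min (nums.getD (2 * i) 0) (nums.getD (2 * i + 1) 0)]) []

-- used by the port's termination proof
lemma pvFoldl_append_map {α β : Type} (f : α → β) :
    ∀ (l : List α) (acc : List β),
      l.foldl (fun a i => a ++ [f i]) acc = acc ++ l.map f := by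
  intro l
  induction l with
  | nil => intro acc; simp
  | cons x xs ih => intro acc; simp [List.foldl, ih]

lemma pvStepA_length (nums : List Int) : (pvStepA nums).length = nums.length / 2 := by
  rw [pvStepA, pvFoldl_append_map]
  simp

def minMaxGame (nums : List Int) : Int :=
  if _h : nums.length > 1 then
    minMaxGame (pvStepA nums)
  else
    (PySem.List.pyGet? nums 0).getD 0
termination_by nums.length
decreasing_by simp [pvStepA_length]; omega

-- ===== PORT B =====
-- list(zip(it, it)) on it = iter(nums): consecutive pairs, a trailing unpaired element is dropped
def pvPairUp : List Int → List (Int × Int)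
  | a :: b :: rest => (a, b) :: pvPairUp rest
  | _ => []

-- used by the port's termination proof
lemma pvPairUp_length : ∀ (l : List Int), (pvPairUp l).length = l.length / 2
  | [] => by simp [pvPairUp]
  | [_] => by simp [pvPairUp]
  | a :: b :: rest => by
      simp [pvPairUp, pvPairUp_length rest]
      omega

-- the comprehension [min(a,b) if i % 2 == 0 else max(a,b) for i,(a,b) in enumerate(zip(it,it))]
def pvReduce (nums : List Int) : List Int :=
  (PySem.List.enumerate (pvPairUp nums)).map
    (fun p => if p.1 % 2 == 0 then min p.2.1 p.2.2 else max p.2.1 p.2.2)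

lemma pvReduce_length (nums : List Int) : (pvReduce nums).length = nums.length / 2 := by
  simp [pvReduce, PySem.List.length_enumerate, pvPairUp_length]

def minMaxGame_alt (nums : List Int) : Int :=
  if _h : nums.length ≤ 1 then
    (PySem.List.pyGet? nums 0).getD 0
  else
    minMaxGame_alt (pvReduce nums)
termination_by nums.length
decreasing_by simp [pvReduce_length]; omega

-- ===== PRECONDITION & SPEC =====
-- Pre_ excludes exactly the empty list, on which Python A raises IndexError (nums[0])
def Pre_minMaxGame (nums : List Int) : Prop := nums ≠ []
instance (nums : List Int) : Decidable (Pre_minMaxGame nums) := by unfold Pre_minMaxGame; infer_instance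
def pvWitness_minMaxGame : List Int := ([1, 3, 5, 2])

def Spec_minMaxGame (nums : List Int) (out : Int) : Prop := out = minMaxGame_alt nums
instance (nums : List Int) (out : Int) : Decidable (Spec_minMaxGame nums out) := by unfold Spec_minMaxGame; infer_instance

-- ===== CLAIM (what is proved, stated in full; the proofs are below) =====
def Claim_equal_minMaxGame : Prop := ∀ (nums : List Int), Dom_minMaxGame nums → Pre_minMaxGame nums → Spec_minMaxGame nums (minMaxGame nums)

-- ===== LEMMAS AND PROOFS =====

-- characterisation of B's comprehension over enumerate(zip(it,it)) as a map over pair indices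
lemma pvEnum_pairUp_eq_map : ∀ (l : List Int) (s : Nat),
    (PySem.List.enumerate (pvPairUp l) (s : Int)).map
        (fun p => if p.1 % 2 == 0 then min p.2.1 p.2.2 else max p.2.1 p.2.2) =
      (List.range (l.length / 2)).map (fun i =>
        if (s + i) % 2 = 0 then
          min (l.getD (2 * i) 0) (l.getD (2 * i + 1) 0)
        else
          max (l.getD (2 * i) 0) (l.getD (2 * i + 1) 0))
  | [], _ => by simp [pvPairUp]
  | [_], _ => by simp [pvPairUp]
  | a :: b :: rest, s => by
    have hlen : (a :: b :: rest).length / 2 = rest.length / 2 + 1 := by simp; omega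
    have hcast : (s : Int) + 1 = ((s + 1 : Nat) : Int) := by push_cast; ring
    rw [pvPairUp, PySem.List.enumerate_cons, List.map_cons, hcast,
        pvEnum_pairUp_eq_map rest (s + 1), hlen, List.range_succ_eq_map]
    simp only [List.map_cons, List.map_map]
    congr 1
    · have hmod : ((s : Int) % 2 == 0) = decide ((s + 0) % 2 = 0) := by
        rcases Nat.mod_two_eq_zero_or_one s with h | h <;>
          · have : (s : Int) % 2 = (s % 2 : Nat) := by omega
            simp [this, h]
      simp [hmod]
    · apply List.map_congr_left
      intro i _
      have h2 : (s + 1 + i) % 2 = (s + (i + 1)) % 2 := by omega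
      have hg1 : (a :: b :: rest)[2 * (i + 1)]?.getD 0 = rest[2 * i]?.getD 0 := by
        have he : 2 * (i + 1) = 2 * i + 1 + 1 := by ring
        simp [he]
      have hg2 : (b :: rest)[2 * (i + 1)]?.getD 0 = rest[2 * i + 1]?.getD 0 := by
        have he : 2 * (i + 1) = 2 * i + 1 + 1 := by ring
        simp [he]
      simp [Function.comp, h2, hg1, hg2]

-- A's round equals B's round
lemma pvStepA_eq_reduce (nums : List Int) : pvStepA nums = pvReduce nums := by
  have h := pvEnum_pairUp_eq_map nums 0
  simp only [Nat.cast_zero, Nat.zero_add] at h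
  rw [pvStepA, pvFoldl_append_map, pvReduce, h]
  apply List.map_congr_left
  intro i _
  rcases Nat.mod_two_eq_zero_or_one i with hm | hm <;> simp [hm]

-- A = B on every list (including the empty list, where both ports return 0)
lemma pvMain : ∀ (nums : List Int), minMaxGame nums = minMaxGame_alt nums := by
  intro nums
  induction nums using minMaxGame.induct with
  | case1 nums h ih =>
    rw [minMaxGame, minMaxGame_alt]
    simp only [h, dif_pos]
    have : ¬ nums.length ≤ 1 := by omega
    rw [dif_neg this, pvStepA_eq_reduce] at *
    exact ih
  | case2 nums h =>
    rw [minMaxGame, minMaxGame_alt]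
    have : nums.length ≤ 1 := by omega
    simp [h, this]

-- ===== VERDICT (by name: the statement is the Claim_ definition above) =====
theorem minMaxGame_spec : Claim_equal_minMaxGame := by
  intro nums _ _
  unfold Spec_minMaxGame
  exact pvMain nums
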